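-- pv_equiv track=rewrite | github.com/saptar/DSA | DSA_String/next_code_in_seq.py | getNextCode
-- ===== SOURCE A (Python) =====
-- import string
--
-- def getNextCode(lastCode):
--
--     arr_alpha = [i for i in list(lastCode) if i in string.ascii_uppercase]
--     arr_num = [int(i) for i in list(lastCode) if i in [str(j) for j in range(10)]]
--
--     carry = 0
--     l_arr_alpha = len(arr_alpha)
--
--     num_add = int(''.join(map(str,arr_num)))+1
--
--     ret_num = ""
--     ret_alpha = ""
--     if num_add > 9999:
--         ret_num = "0000"
--         carry = 1
--     else:
--         tmp = 0
--         if len(str(num_add))<4: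
--             tmp = 4- len(str(num_add))
--         ret_num ="0"*tmp +  str(num_add)
--         carry = 0
--
--     counter = -1
--     while l_arr_alpha > 0:
--         if ord(arr_alpha[counter])+ carry > 90:
--             ret_alpha +="A"
--             carry = 1
--         else:
--             ret_alpha += chr(ord(arr_alpha[counter])+carry)
--             carry = 0
--         l_arr_alpha -=1
--         counter -=1
--     if carry == 1:
--         ret_alpha+="A"
--
--
--     return ret_alpha[::-1]+str(ret_num)
-- ===== SOURCE B (Python) =====
-- import string
--
-- def getNextCode(lastCode):
--     letters = ''.join(c for c in lastCode if c in string.ascii_uppercase)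
--     digits = ''.join(c for c in lastCode if c in string.digits)
--     num = int(digits) + 1
--     if num > 9999:
--         num_str, carry = "0000", True
--     else:
--         num_str, carry = str(num).rjust(4, "0"), False
--     if carry:
--         head = letters.rstrip("Z")
--         zs = len(letters) - len(head)
--         if head:
--             letters = head[:-1] + chr(ord(head[-1]) + 1) + "A" * zs
--         else:
--             letters = "A" * (zs + 1)
--     return letters + num_str
-- ===== Notes on version B (the rewrite author's own statement) =====
-- stated objective: simpler
-- what changed: replaces A's right-to-left per-character carry loop (building a reversed string and re-reversing it) with a closed-form base-26 bump: strip the trailing 'Z's, increment the last remaining letter, and append that many 'A's; the number part is str(num).rjust(4,'0') instead of manual padding arithmetic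
import Mathlib
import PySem

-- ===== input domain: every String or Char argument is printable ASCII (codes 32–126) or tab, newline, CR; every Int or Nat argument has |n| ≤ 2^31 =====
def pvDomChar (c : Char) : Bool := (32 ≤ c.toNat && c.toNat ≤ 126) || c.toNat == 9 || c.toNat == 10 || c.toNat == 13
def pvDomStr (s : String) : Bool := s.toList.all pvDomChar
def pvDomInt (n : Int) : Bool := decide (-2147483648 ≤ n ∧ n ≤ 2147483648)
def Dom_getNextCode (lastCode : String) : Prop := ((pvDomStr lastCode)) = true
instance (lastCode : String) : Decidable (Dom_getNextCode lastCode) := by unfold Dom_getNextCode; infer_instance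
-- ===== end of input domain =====

-- B replaces A's right-to-left carry loop by a closed-form bump (strip trailing 'Z's,
-- increment the last remaining letter, append 'A's) and pads the number with rjust;
-- objective: simpler.

-- ===== PORT A =====
-- string.ascii_uppercase and the digit list [str(j) for j in range(10)] as literals
def pvUpper : List Char :=
  ['A','B','C','D','E','F','G','H','I','J','K','L','M',
   'N','O','P','Q','R','S','T','U','V','W','X','Y','Z']
def pvDigs : List Char := ['0','1','2','3','4','5','6','7','8','9']

-- A's while loop: walks arr_alpha right-to-left (here: over its reverse), appending to ret_alpha
def pvLoopA : List Char → Nat → List Char → Nat × List Char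
  | [], carry, acc => (carry, acc)
  | c :: rest, carry, acc =>
      if c.toNat + carry > 90 then pvLoopA rest 1 (acc ++ ['A'])
      else pvLoopA rest 0 (acc ++ [Char.ofNat (c.toNat + carry)])

def getNextCode (lastCode : String) : String :=
  let arr_alpha := lastCode.toList.filter (fun c => pvUpper.contains c)
  -- int(i) for a single digit char i is its value
  let arr_num : List Int :=
    (lastCode.toList.filter (fun c => pvDigs.contains c)).map (fun c => ((c.toNat : Int) - 48))
  -- int(''.join(map(str, arr_num))) + 1; the ValueError on no digits is excluded by Pre_
  let num_add : Int :=
    (PySem.Int.ofChars? (PySem.Chars.join [] (arr_num.map PySem.Int.toChars))).getD 0 + 1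
  let nc : List Char × Nat :=
    if num_add > 9999 then (['0','0','0','0'], 1)
    else
      let s := PySem.Int.toChars num_add
      let tmp := if s.length < 4 then 4 - s.length else 0
      (List.replicate tmp '0' ++ s, 0)
  let r := pvLoopA arr_alpha.reverse nc.2 []
  let ret_alpha := if r.1 = 1 then r.2 ++ ['A'] else r.2
  String.mk (ret_alpha.reverse ++ nc.1)

-- ===== PORT B =====
def getNextCode_alt (lastCode : String) : String :=
  let letters := lastCode.toList.filter (fun c => pvUpper.contains c)
  let digits := lastCode.toList.filter (fun c => pvDigs.contains c)
  let num : Int := (PySem.Int.ofChars? digits).getD 0 + 1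
  let nc : List Char × Bool :=
    if num > 9999 then (['0','0','0','0'], true)
    -- str(num).rjust(4,'0'): left-pad to width 4 (Nat subtraction = rjust's no-truncation)
    else (List.replicate (4 - (PySem.Int.toChars num).length) '0' ++ PySem.Int.toChars num, false)
  let letters' :=
    if nc.2 then
      -- letters.rstrip("Z")
      let head := (letters.reverse.dropWhile (fun c => c == 'Z')).reverse
      let zs := letters.length - head.length
      if head ≠ [] then
        head.dropLast ++ [Char.ofNat ((head.getLastD 'A').toNat + 1)] ++ List.replicate zs 'A'
      else List.replicate (zs + 1) 'A'
    else letters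
  String.mk (letters' ++ nc.1)

-- ===== PRECONDITION & SPEC =====
-- Pre_ excludes exactly the inputs with no decimal digit, on which A raises ValueError (int('')).
def Pre_getNextCode (lastCode : String) : Prop :=
  lastCode.toList.any (fun c => pvDigs.contains c) = true
instance (lastCode : String) : Decidable (Pre_getNextCode lastCode) := by
  unfold Pre_getNextCode; infer_instance
def pvWitness_getNextCode : String := "AZ0009"

def Spec_getNextCode (lastCode : String) (out : String) : Prop := out = getNextCode_alt lastCode
instance (lastCode : String) (out : String) : Decidable (Spec_getNextCode lastCode out) := by
  unfold Spec_getNextCode; infer_instance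

-- ===== CLAIM (what is proved, stated in full; the proofs are below) =====
def Claim_equal_getNextCode : Prop := ∀ (lastCode : String), Dom_getNextCode lastCode → Pre_getNextCode lastCode → Spec_getNextCode lastCode (getNextCode lastCode)

-- ===== LEMMAS AND PROOFS =====

-- str(int(c)) = c for a digit char
theorem pv_digit_toChars {c : Char} (hc : c ∈ pvDigs) :
    PySem.Int.toChars ((c.toNat : Int) - 48) = [c] := by
  fin_cases hc <;> decide

theorem pv_upper_bounds {c : Char} (hc : c ∈ pvUpper) :
    65 ≤ c.toNat ∧ c.toNat ≤ 90 := by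
  fin_cases hc <;> decide

-- A's joined numeric string is just the filtered digit characters
theorem pv_join_digits (D : List Char) (hD : ∀ c ∈ D, c ∈ pvDigs) :
    PySem.Chars.join [] ((D.map (fun c => ((c.toNat : Int) - 48))).map PySem.Int.toChars) = D := by
  rw [List.map_map]
  have : D.map (PySem.Int.toChars ∘ fun c => ((c.toNat : Int) - 48)) = D.map ([·]) := by
    apply List.map_congr_left
    intro c hc
    exact pv_digit_toChars (hD c hc)
  rw [this, PySem.Chars.join_nil_singletons]

theorem pv_loop_zero (L : List Char) (acc : List Char) (h : ∀ c ∈ L, c.toNat ≤ 90) :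
    pvLoopA L 0 acc = (0, acc ++ L) := by
  induction L generalizing acc with
  | nil => simp [pvLoopA]
  | cons c rest ih =>
      have hc := h c (by simp)
      have hif : ¬ (c.toNat + 0 > 90) := by omega
      simp only [pvLoopA]
      rw [if_neg hif, Nat.add_zero, Char.ofNat_toNat]
      rw [ih _ (fun x hx => h x (by simp [hx]))]
      simp

theorem pv_loop_z (k : Nat) (rest acc : List Char) :
    pvLoopA (List.replicate k 'Z' ++ rest) 1 acc
      = pvLoopA rest 1 (acc ++ List.replicate k 'A') := by
  induction k generalizing acc with
  | zero => simp
  | succ n ih =>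
      rw [List.replicate_succ, List.cons_append]
      show pvLoopA ('Z' :: (List.replicate n 'Z' ++ rest)) 1 acc = _
      have : ('Z'.toNat + 1 > 90) := by decide
      simp only [pvLoopA, if_pos this]
      rw [ih]
      congr 1
      rw [List.append_assoc]
      congr 1

theorem pv_dropWhile_cons_false {p : Char → Bool} {l : List Char} {c : Char} {ds : List Char}
    (h : l.dropWhile p = c :: ds) : p c = false := by
  induction l with
  | nil => simp at h
  | cons a l ih =>
      rw [List.dropWhile_cons] at h
      by_cases hp : p a
      · exact ih (by simpa [hp] using h)
      · rw [if_neg hp] at h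
        cases h
        simpa using hp

-- ===== VERDICT (by name: the statement is the Claim_ definition above) =====
theorem getNextCode_spec : Claim_equal_getNextCode := by
  intro lastCode _ _
  unfold Spec_getNextCode
  simp only [getNextCode, getNextCode_alt]
  have hD : ∀ c ∈ lastCode.toList.filter (fun c => pvDigs.contains c), c ∈ pvDigs := by
    intro c hc; simpa using (List.mem_filter.mp hc).2
  rw [pv_join_digits _ hD]
  set L := lastCode.toList.filter (fun c => pvUpper.contains c) with hLdef
  set D := lastCode.toList.filter (fun c => pvDigs.contains c) with hDdef
  have hLmem : ∀ c ∈ L, 65 ≤ c.toNat ∧ c.toNat ≤ 90 := by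
    intro c hc
    exact pv_upper_bounds (by simpa using (List.mem_filter.mp hc).2)
  set N : Int := (PySem.Int.ofChars? D).getD 0 + 1 with hNdef
  by_cases h : N > 9999
  · -- carry = 1
    simp only [if_pos h]
    set t := L.reverse.takeWhile (fun c => c == 'Z') with htdef
    set d := L.reverse.dropWhile (fun c => c == 'Z') with hddef
    have hsplit : t ++ d = L.reverse := List.takeWhile_append_dropWhile
    have ht : t = List.replicate t.length 'Z' := by
      refine List.eq_replicate_iff.mpr ⟨rfl, ?_⟩
      intro b hb
      have hbz := List.mem_takeWhile_imp hb
      simpa using hbz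
    have hLlen : L.length = t.length + d.length := by
      have hl := congrArg List.length hsplit
      simpa using hl.symm
    have hloop : pvLoopA L.reverse 1 [] = pvLoopA d 1 (List.replicate t.length 'A') := by
      conv_lhs => rw [← hsplit, ht]
      rw [pv_loop_z]
      simp
    have hdmem : ∀ x ∈ d, 65 ≤ x.toNat ∧ x.toNat ≤ 90 := by
      intro x hx
      have hsub : d.Sublist L.reverse := hddef ▸ List.dropWhile_sublist ..
      exact hLmem x (List.mem_reverse.mp (hsub.subset hx))
    cases hd : d with
    | nil =>
        rw [hd] at hloop hLlen
        simp only [pvLoopA] at hloop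
        rw [hloop]
        have hlen0 : L.length = t.length := by simpa using hLlen
        simp [hlen0, List.reverse_append, ← List.replicate_succ]
    | cons c ds =>
        have hcz : (c == 'Z') = false :=
          pv_dropWhile_cons_false (p := fun x => x == 'Z') (c := c) (ds := ds) (hddef.symm.trans hd)
        have hcb := hdmem c (by rw [hd]; simp)
        have hc89 : c.toNat ≤ 89 := by
          rcases Nat.lt_or_ge c.toNat 90 with h9 | h9
          · omega
          · exfalso
            have h90 : c.toNat = 90 := by omega
            have : c = 'Z' := by rw [← Char.ofNat_toNat c, h90]
            simp [this] at hcz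
        have hloop2 : pvLoopA d 1 (List.replicate t.length 'A')
            = (0, List.replicate t.length 'A' ++ [Char.ofNat (c.toNat + 1)] ++ ds) := by
          rw [hd]
          have hif : ¬ (c.toNat + 1 > 90) := by omega
          simp only [pvLoopA]
          rw [if_neg hif]
          rw [pv_loop_zero ds _ (by intro x hx; exact (hdmem x (by rw [hd]; simp [hx])).2)]
        rw [hloop, hloop2]
        have hzs : L.length - (ds.length + 1) = t.length := by
          rw [hd] at hLlen; simp at hLlen; omega
        simp [List.reverse_append, List.reverse_cons, hzs, List.append_assoc]
  · -- carry = 0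
    simp only [if_neg h]
    rw [pv_loop_zero L.reverse [] (by intro c hc; exact (hLmem c (List.mem_reverse.mp hc)).2)]
    have htmp : (if (PySem.Int.toChars N).length < 4 then 4 - (PySem.Int.toChars N).length else 0)
        = 4 - (PySem.Int.toChars N).length := by split <;> omega
    simp [htmp]
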